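-- pv_equiv track=rewrite | github.com/sahilkur36/apeGmsh | src/apeGmsh/solvers/_recorder_emit.py | _canonical_to_mpco_element_token
-- ===== SOURCE A (Python) =====
-- _MPCO_ELEMENT_PREFIX_TOKENS: dict[str, str] = {
--     "stress": "stresses",
--     "strain": "strains",
--     "von_mises_stress": "stresses",       # derived; recorded via "stresses"
--     "principal_stress": "stresses",
--     "pressure_hydrostatic": "stresses",
--     "equivalent_plastic_strain": "strains",
--     "axial_force": "section.force",
--     "shear": "section.force",
--     "torsion": "section.force",
--     "bending_moment": "section.force",
--     "fiber_stress": "section.fiber.stress",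
--     "fiber_strain": "section.fiber.strain",
--     "nodal_resisting_force": "globalForce",
--     "nodal_resisting_force_local": "localForce",
--     "nodal_resisting_moment": "globalForce",
--     "nodal_resisting_moment_local": "localForce",
-- }
--
-- def _canonical_to_mpco_element_token(canonical: str) -> str | None:
--     """Map a canonical element-level name to an MPCO ``-E`` token.
--
--     Checks the longest prefix first so ``nodal_resisting_force_local``
--     wins over ``nodal_resisting_force`` for ``nodal_resisting_force_local_x``.
--     """
--     sorted_prefixes = sorted(
--         _MPCO_ELEMENT_PREFIX_TOKENS.items(),
--         key=lambda kv: -len(kv[0]),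
--     )
--     for prefix, token in sorted_prefixes:
--         if canonical == prefix or canonical.startswith(prefix + "_"):
--             return token
--     return None
-- ===== SOURCE B (Python) =====
-- _MPCO_ELEMENT_PREFIX_TOKENS: dict[str, str] = {
--     "stress": "stresses",
--     "strain": "strains",
--     "von_mises_stress": "stresses",
--     "principal_stress": "stresses",
--     "pressure_hydrostatic": "stresses",
--     "equivalent_plastic_strain": "strains",
--     "axial_force": "section.force",
--     "shear": "section.force",
--     "torsion": "section.force",
--     "bending_moment": "section.force",
--     "fiber_stress": "section.fiber.stress",
--     "fiber_strain": "section.fiber.strain",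
--     "nodal_resisting_force": "globalForce",
--     "nodal_resisting_force_local": "localForce",
--     "nodal_resisting_moment": "globalForce",
--     "nodal_resisting_moment_local": "localForce",
-- }
--
--
-- def _canonical_to_mpco_element_token(canonical: str) -> str | None:
--     """Single pass over the table keeping the longest matching prefix: no sort."""
--     best = None
--     for prefix, token in _MPCO_ELEMENT_PREFIX_TOKENS.items():
--         if (canonical == prefix or canonical.startswith(prefix + "_")) and (
--             best is None or len(best[0]) < len(prefix)
--         ):
--             best = (prefix, token)
--     return None if best is None else best[1]
-- ===== Notes on version B (the rewrite author's own statement) =====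
-- stated objective: alternative
-- what changed: Replaces sort-the-table-by-descending-length-then-return-first-match with a single unsorted pass that tracks the longest matching prefix in an accumulator.
import Mathlib
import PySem

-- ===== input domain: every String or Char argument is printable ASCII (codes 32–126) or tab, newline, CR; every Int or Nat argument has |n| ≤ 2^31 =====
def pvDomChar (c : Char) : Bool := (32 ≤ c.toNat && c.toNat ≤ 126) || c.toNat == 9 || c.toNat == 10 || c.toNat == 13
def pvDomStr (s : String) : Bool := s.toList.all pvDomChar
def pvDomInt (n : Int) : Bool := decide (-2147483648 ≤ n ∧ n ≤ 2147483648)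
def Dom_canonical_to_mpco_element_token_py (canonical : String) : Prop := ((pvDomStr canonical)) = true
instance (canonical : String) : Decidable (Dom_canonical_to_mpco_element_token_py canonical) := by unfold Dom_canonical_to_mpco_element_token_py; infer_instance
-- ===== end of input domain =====

-- B replaces A's sort-by-descending-key-length-then-first-match with one unsorted pass keeping the longest matching prefix (alternative decomposition, same result).

-- the literal dict _MPCO_ELEMENT_PREFIX_TOKENS, as its items in insertion order (keys are distinct)
def mpcoItems : List (String × String) := [("stress", "stresses"), ("strain", "strains"), ("von_mises_stress", "stresses"), ("principal_stress", "stresses"), ("pressure_hydrostatic", "stresses"), ("equivalent_plastic_strain", "strains"), ("axial_force", "section.force"), ("shear", "section.force"), ("torsion", "section.force"), ("bending_moment", "section.force"), ("fiber_stress", "section.fiber.stress"), ("fiber_strain", "section.fiber.strain"), ("nodal_resisting_force", "globalForce"), ("nodal_resisting_force_local", "localForce"), ("nodal_resisting_moment", "globalForce"), ("nodal_resisting_moment_local", "localForce")]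

-- the shared match test: canonical == prefix or canonical.startswith(prefix + "_")
def mB (c p : String) : Bool := c == p || PySem.Str.startswith c (p ++ "_")

-- ===== PORT A =====
-- the for-loop over sorted_prefixes with early return
def matchTokA? : List (String × String) → String → Option String
  | [], _ => none
  | (p, t) :: rest, c => if mB c p then some t else matchTokA? rest c

def canonical_to_mpco_element_token_py (canonical : String) : Option String :=
  matchTokA? (PySem.List.sorted mpcoItems (fun kv => -(PySem.Str.len kv.1)) false) canonical

-- ===== PORT B =====
-- one step of B's loop: replace best only by a strictly longer matching prefix
def pickBest (c : String) (best : Option (String × String)) (kv : String × String) : Option (String × String) :=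
  if mB c kv.1 && (match best with | none => true | some (q, _) => decide (PySem.Str.len q < PySem.Str.len kv.1)) then some kv else best

def canonical_to_mpco_element_token_py_alt (canonical : String) : Option String :=
  match List.foldl (pickBest canonical) none mpcoItems with
  | none => none
  | some (_, t) => some t

-- ===== PRECONDITION & SPEC =====
def Spec_canonical_to_mpco_element_token_py (canonical : String) (out : Option String) : Prop := out = canonical_to_mpco_element_token_py_alt canonical
instance (canonical : String) (out : Option String) : Decidable (Spec_canonical_to_mpco_element_token_py canonical out) := by unfold Spec_canonical_to_mpco_element_token_py; infer_instance

-- ===== CLAIM (what is proved, stated in full; the proofs are below) =====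
def Claim_equal_canonical_to_mpco_element_token_py : Prop := ∀ (canonical : String), Dom_canonical_to_mpco_element_token_py canonical → Spec_canonical_to_mpco_element_token_py canonical (canonical_to_mpco_element_token_py canonical)

-- ===== LEMMAS AND PROOFS =====

-- A's sorted table, evaluated once (stable descending key length)
def mpcoSorted : List (String × String) := [("nodal_resisting_moment_local", "localForce"), ("nodal_resisting_force_local", "localForce"), ("equivalent_plastic_strain", "strains"), ("nodal_resisting_moment", "globalForce"), ("nodal_resisting_force", "globalForce"), ("pressure_hydrostatic", "stresses"), ("von_mises_stress", "stresses"), ("principal_stress", "stresses"), ("bending_moment", "section.force"), ("fiber_stress", "section.fiber.stress"), ("fiber_strain", "section.fiber.strain"), ("axial_force", "section.force"), ("torsion", "section.force"), ("stress", "stresses"), ("strain", "strains"), ("shear", "section.force")]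

theorem sorted_lit : PySem.List.sorted mpcoItems (fun kv => -(PySem.Str.len kv.1)) false = mpcoSorted := by decide

theorem fold_keep (c p t : String) (l : List (String × String))
    (h : ∀ q u, (q, u) ∈ l → mB c q = true → q.length ≤ p.length) :
    List.foldl (pickBest c) (some (p, t)) l = some (p, t) := by
  induction l with
  | nil => rfl
  | cons hd tl ih =>
    obtain ⟨q, u⟩ := hd
    rw [List.foldl_cons]
    have hstep : pickBest c (some (p, t)) (q, u) = some (p, t) := by
      by_cases hm : mB c q = true
      · have hle : ¬ (p.length < q.length) :=
          not_lt.mpr (h q u (List.mem_cons_self) hm)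
        simp [pickBest, hm, hle]
      · simp [pickBest, hm]
    rw [hstep]
    exact ih (fun q u hq hm => h q u (List.mem_cons_of_mem _ hq) hm)

theorem pick_cases (c : String) (acc : Option (String × String)) (kv : String × String) :
    pickBest c acc kv = acc ∨ (pickBest c acc kv = some kv ∧ mB c kv.1 = true) := by
  unfold pickBest
  split_ifs with h
  · exact Or.inr ⟨rfl, by revert h; cases mB c kv.1 <;> simp⟩
  · exact Or.inl rfl

theorem fold_inv (c : String) (l : List (String × String)) :
    ∀ acc, List.foldl (pickBest c) acc l = acc ∨
      ∃ q u, List.foldl (pickBest c) acc l = some (q, u) ∧ (q, u) ∈ l ∧ mB c q = true := by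
  induction l with
  | nil => intro acc; exact Or.inl rfl
  | cons hd tl ih =>
    intro acc
    obtain ⟨q, u⟩ := hd
    rw [List.foldl_cons]
    rcases pick_cases c acc (q, u) with h | ⟨h, hm⟩
    · rw [h]
      rcases ih acc with h2 | ⟨q2, u2, h2, hmem, hm2⟩
      · exact Or.inl h2
      · exact Or.inr ⟨q2, u2, h2, List.mem_cons_of_mem _ hmem, hm2⟩
    · rw [h]
      rcases ih (some (q, u)) with h2 | ⟨q2, u2, h2, hmem, hm2⟩
      · exact Or.inr ⟨q, u, h2, List.mem_cons_self, hm⟩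
      · exact Or.inr ⟨q2, u2, h2, List.mem_cons_of_mem _ hmem, hm2⟩

theorem fold_nomatch (c : String) (l : List (String × String)) (acc : Option (String × String))
    (h : ∀ q u, (q, u) ∈ l → mB c q = false) :
    List.foldl (pickBest c) acc l = acc := by
  induction l with
  | nil => rfl
  | cons hd tl ih =>
    obtain ⟨q, u⟩ := hd
    rw [List.foldl_cons]
    have hstep : pickBest c acc (q, u) = acc := by
      simp [pickBest, h q u (List.mem_cons_self)]
    rw [hstep]
    exact ih (fun q u hq => h q u (List.mem_cons_of_mem _ hq))

theorem main_case (c : String) (pre suf : List (String × String)) (p t : String)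
    (hp : mB c p = true)
    (hpre : ∀ q u, (q, u) ∈ pre → mB c q = true → q.length < p.length)
    (hsuf : ∀ q u, (q, u) ∈ suf → mB c q = true → q.length ≤ p.length) :
    List.foldl (pickBest c) none (pre ++ (p, t) :: suf) = some (p, t) := by
  rw [List.foldl_append, List.foldl_cons]
  rcases fold_inv c pre none with h | ⟨q, u, h, hmem, hm⟩
  · rw [h]
    have hstep : pickBest c none (p, t) = some (p, t) := by simp [pickBest, hp]
    rw [hstep]
    exact fold_keep c p t suf hsuf
  · rw [h]
    have hlt := hpre q u hmem hm
    have hstep : pickBest c (some (q, u)) (p, t) = some (p, t) := by simp [pickBest, hp, hlt]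
    rw [hstep]
    exact fold_keep c p t suf hsuf

theorem ab_eq (c : String) :
    canonical_to_mpco_element_token_py c = canonical_to_mpco_element_token_py_alt c := by
  unfold canonical_to_mpco_element_token_py canonical_to_mpco_element_token_py_alt
  rw [sorted_lit]
  by_cases h1 : mB c "nodal_resisting_moment_local" = true
  · have hB : List.foldl (pickBest c) none mpcoItems = some ("nodal_resisting_moment_local", "localForce") := by
      rw [show mpcoItems = [("stress", "stresses"), ("strain", "strains"), ("von_mises_stress", "stresses"), ("principal_stress", "stresses"), ("pressure_hydrostatic", "stresses"), ("equivalent_plastic_strain", "strains"), ("axial_force", "section.force"), ("shear", "section.force"), ("torsion", "section.force"), ("bending_moment", "section.force"), ("fiber_stress", "section.fiber.stress"), ("fiber_strain", "section.fiber.strain"), ("nodal_resisting_force", "globalForce"), ("nodal_resisting_force_local", "localForce"), ("nodal_resisting_moment", "globalForce")] ++ ("nodal_resisting_moment_local", "localForce") :: [] from rfl]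
      refine main_case c _ _ _ _ h1 ?_ ?_
      · intro q u hq hm; fin_cases hq <;> first | decide | simp_all
      · intro q u hq hm; fin_cases hq <;> first | decide | simp_all
    rw [hB]
    simp [matchTokA?, mpcoSorted, h1]
  by_cases h2 : mB c "nodal_resisting_force_local" = true
  · have hB : List.foldl (pickBest c) none mpcoItems = some ("nodal_resisting_force_local", "localForce") := by
      rw [show mpcoItems = [("stress", "stresses"), ("strain", "strains"), ("von_mises_stress", "stresses"), ("principal_stress", "stresses"), ("pressure_hydrostatic", "stresses"), ("equivalent_plastic_strain", "strains"), ("axial_force", "section.force"), ("shear", "section.force"), ("torsion", "section.force"), ("bending_moment", "section.force"), ("fiber_stress", "section.fiber.stress"), ("fiber_strain", "section.fiber.strain"), ("nodal_resisting_force", "globalForce")] ++ ("nodal_resisting_force_local", "localForce") :: [("nodal_resisting_moment", "globalForce"), ("nodal_resisting_moment_local", "localForce")] from rfl]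
      refine main_case c _ _ _ _ h2 ?_ ?_
      · intro q u hq hm; fin_cases hq <;> first | decide | simp_all
      · intro q u hq hm; fin_cases hq <;> first | decide | simp_all
    rw [hB]
    simp [matchTokA?, mpcoSorted, h1, h2]
  by_cases h3 : mB c "equivalent_plastic_strain" = true
  · have hB : List.foldl (pickBest c) none mpcoItems = some ("equivalent_plastic_strain", "strains") := by
      rw [show mpcoItems = [("stress", "stresses"), ("strain", "strains"), ("von_mises_stress", "stresses"), ("principal_stress", "stresses"), ("pressure_hydrostatic", "stresses")] ++ ("equivalent_plastic_strain", "strains") :: [("axial_force", "section.force"), ("shear", "section.force"), ("torsion", "section.force"), ("bending_moment", "section.force"), ("fiber_stress", "section.fiber.stress"), ("fiber_strain", "section.fiber.strain"), ("nodal_resisting_force", "globalForce"), ("nodal_resisting_force_local", "localForce"), ("nodal_resisting_moment", "globalForce"), ("nodal_resisting_moment_local", "localForce")] from rfl]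
      refine main_case c _ _ _ _ h3 ?_ ?_
      · intro q u hq hm; fin_cases hq <;> first | decide | simp_all
      · intro q u hq hm; fin_cases hq <;> first | decide | simp_all
    rw [hB]
    simp [matchTokA?, mpcoSorted, h1, h2, h3]
  by_cases h4 : mB c "nodal_resisting_moment" = true
  · have hB : List.foldl (pickBest c) none mpcoItems = some ("nodal_resisting_moment", "globalForce") := by
      rw [show mpcoItems = [("stress", "stresses"), ("strain", "strains"), ("von_mises_stress", "stresses"), ("principal_stress", "stresses"), ("pressure_hydrostatic", "stresses"), ("equivalent_plastic_strain", "strains"), ("axial_force", "section.force"), ("shear", "section.force"), ("torsion", "section.force"), ("bending_moment", "section.force"), ("fiber_stress", "section.fiber.stress"), ("fiber_strain", "section.fiber.strain"), ("nodal_resisting_force", "globalForce"), ("nodal_resisting_force_local", "localForce")] ++ ("nodal_resisting_moment", "globalForce") :: [("nodal_resisting_moment_local", "localForce")] from rfl]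
      refine main_case c _ _ _ _ h4 ?_ ?_
      · intro q u hq hm; fin_cases hq <;> first | decide | simp_all
      · intro q u hq hm; fin_cases hq <;> first | decide | simp_all
    rw [hB]
    simp [matchTokA?, mpcoSorted, h1, h2, h3, h4]
  by_cases h5 : mB c "nodal_resisting_force" = true
  · have hB : List.foldl (pickBest c) none mpcoItems = some ("nodal_resisting_force", "globalForce") := by
      rw [show mpcoItems = [("stress", "stresses"), ("strain", "strains"), ("von_mises_stress", "stresses"), ("principal_stress", "stresses"), ("pressure_hydrostatic", "stresses"), ("equivalent_plastic_strain", "strains"), ("axial_force", "section.force"), ("shear", "section.force"), ("torsion", "section.force"), ("bending_moment", "section.force"), ("fiber_stress", "section.fiber.stress"), ("fiber_strain", "section.fiber.strain")] ++ ("nodal_resisting_force", "globalForce") :: [("nodal_resisting_force_local", "localForce"), ("nodal_resisting_moment", "globalForce"), ("nodal_resisting_moment_local", "localForce")] from rfl]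
      refine main_case c _ _ _ _ h5 ?_ ?_
      · intro q u hq hm; fin_cases hq <;> first | decide | simp_all
      · intro q u hq hm; fin_cases hq <;> first | decide | simp_all
    rw [hB]
    simp [matchTokA?, mpcoSorted, h1, h2, h3, h4, h5]
  by_cases h6 : mB c "pressure_hydrostatic" = true
  · have hB : List.foldl (pickBest c) none mpcoItems = some ("pressure_hydrostatic", "stresses") := by
      rw [show mpcoItems = [("stress", "stresses"), ("strain", "strains"), ("von_mises_stress", "stresses"), ("principal_stress", "stresses")] ++ ("pressure_hydrostatic", "stresses") :: [("equivalent_plastic_strain", "strains"), ("axial_force", "section.force"), ("shear", "section.force"), ("torsion", "section.force"), ("bending_moment", "section.force"), ("fiber_stress", "section.fiber.stress"), ("fiber_strain", "section.fiber.strain"), ("nodal_resisting_force", "globalForce"), ("nodal_resisting_force_local", "localForce"), ("nodal_resisting_moment", "globalForce"), ("nodal_resisting_moment_local", "localForce")] from rfl]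
      refine main_case c _ _ _ _ h6 ?_ ?_
      · intro q u hq hm; fin_cases hq <;> first | decide | simp_all
      · intro q u hq hm; fin_cases hq <;> first | decide | simp_all
    rw [hB]
    simp [matchTokA?, mpcoSorted, h1, h2, h3, h4, h5, h6]
  by_cases h7 : mB c "von_mises_stress" = true
  · have hB : List.foldl (pickBest c) none mpcoItems = some ("von_mises_stress", "stresses") := by
      rw [show mpcoItems = [("stress", "stresses"), ("strain", "strains")] ++ ("von_mises_stress", "stresses") :: [("principal_stress", "stresses"), ("pressure_hydrostatic", "stresses"), ("equivalent_plastic_strain", "strains"), ("axial_force", "section.force"), ("shear", "section.force"), ("torsion", "section.force"), ("bending_moment", "section.force"), ("fiber_stress", "section.fiber.stress"), ("fiber_strain", "section.fiber.strain"), ("nodal_resisting_force", "globalForce"), ("nodal_resisting_force_local", "localForce"), ("nodal_resisting_moment", "globalForce"), ("nodal_resisting_moment_local", "localForce")] from rfl]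
      refine main_case c _ _ _ _ h7 ?_ ?_
      · intro q u hq hm; fin_cases hq <;> first | decide | simp_all
      · intro q u hq hm; fin_cases hq <;> first | decide | simp_all
    rw [hB]
    simp [matchTokA?, mpcoSorted, h1, h2, h3, h4, h5, h6, h7]
  by_cases h8 : mB c "principal_stress" = true
  · have hB : List.foldl (pickBest c) none mpcoItems = some ("principal_stress", "stresses") := by
      rw [show mpcoItems = [("stress", "stresses"), ("strain", "strains"), ("von_mises_stress", "stresses")] ++ ("principal_stress", "stresses") :: [("pressure_hydrostatic", "stresses"), ("equivalent_plastic_strain", "strains"), ("axial_force", "section.force"), ("shear", "section.force"), ("torsion", "section.force"), ("bending_moment", "section.force"), ("fiber_stress", "section.fiber.stress"), ("fiber_strain", "section.fiber.strain"), ("nodal_resisting_force", "globalForce"), ("nodal_resisting_force_local", "localForce"), ("nodal_resisting_moment", "globalForce"), ("nodal_resisting_moment_local", "localForce")] from rfl]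
      refine main_case c _ _ _ _ h8 ?_ ?_
      · intro q u hq hm; fin_cases hq <;> first | decide | simp_all
      · intro q u hq hm; fin_cases hq <;> first | decide | simp_all
    rw [hB]
    simp [matchTokA?, mpcoSorted, h1, h2, h3, h4, h5, h6, h7, h8]
  by_cases h9 : mB c "bending_moment" = true
  · have hB : List.foldl (pickBest c) none mpcoItems = some ("bending_moment", "section.force") := by
      rw [show mpcoItems = [("stress", "stresses"), ("strain", "strains"), ("von_mises_stress", "stresses"), ("principal_stress", "stresses"), ("pressure_hydrostatic", "stresses"), ("equivalent_plastic_strain", "strains"), ("axial_force", "section.force"), ("shear", "section.force"), ("torsion", "section.force")] ++ ("bending_moment", "section.force") :: [("fiber_stress", "section.fiber.stress"), ("fiber_strain", "section.fiber.strain"), ("nodal_resisting_force", "globalForce"), ("nodal_resisting_force_local", "localForce"), ("nodal_resisting_moment", "globalForce"), ("nodal_resisting_moment_local", "localForce")] from rfl]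
      refine main_case c _ _ _ _ h9 ?_ ?_
      · intro q u hq hm; fin_cases hq <;> first | decide | simp_all
      · intro q u hq hm; fin_cases hq <;> first | decide | simp_all
    rw [hB]
    simp [matchTokA?, mpcoSorted, h1, h2, h3, h4, h5, h6, h7, h8, h9]
  by_cases h10 : mB c "fiber_stress" = true
  · have hB : List.foldl (pickBest c) none mpcoItems = some ("fiber_stress", "section.fiber.stress") := by
      rw [show mpcoItems = [("stress", "stresses"), ("strain", "strains"), ("von_mises_stress", "stresses"), ("principal_stress", "stresses"), ("pressure_hydrostatic", "stresses"), ("equivalent_plastic_strain", "strains"), ("axial_force", "section.force"), ("shear", "section.force"), ("torsion", "section.force"), ("bending_moment", "section.force")] ++ ("fiber_stress", "section.fiber.stress") :: [("fiber_strain", "section.fiber.strain"), ("nodal_resisting_force", "globalForce"), ("nodal_resisting_force_local", "localForce"), ("nodal_resisting_moment", "globalForce"), ("nodal_resisting_moment_local", "localForce")] from rfl]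
      refine main_case c _ _ _ _ h10 ?_ ?_
      · intro q u hq hm; fin_cases hq <;> first | decide | simp_all
      · intro q u hq hm; fin_cases hq <;> first | decide | simp_all
    rw [hB]
    simp [matchTokA?, mpcoSorted, h1, h2, h3, h4, h5, h6, h7, h8, h9, h10]
  by_cases h11 : mB c "fiber_strain" = true
  · have hB : List.foldl (pickBest c) none mpcoItems = some ("fiber_strain", "section.fiber.strain") := by
      rw [show mpcoItems = [("stress", "stresses"), ("strain", "strains"), ("von_mises_stress", "stresses"), ("principal_stress", "stresses"), ("pressure_hydrostatic", "stresses"), ("equivalent_plastic_strain", "strains"), ("axial_force", "section.force"), ("shear", "section.force"), ("torsion", "section.force"), ("bending_moment", "section.force"), ("fiber_stress", "section.fiber.stress")] ++ ("fiber_strain", "section.fiber.strain") :: [("nodal_resisting_force", "globalForce"), ("nodal_resisting_force_local", "localForce"), ("nodal_resisting_moment", "globalForce"), ("nodal_resisting_moment_local", "localForce")] from rfl]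
      refine main_case c _ _ _ _ h11 ?_ ?_
      · intro q u hq hm; fin_cases hq <;> first | decide | simp_all
      · intro q u hq hm; fin_cases hq <;> first | decide | simp_all
    rw [hB]
    simp [matchTokA?, mpcoSorted, h1, h2, h3, h4, h5, h6, h7, h8, h9, h10, h11]
  by_cases h12 : mB c "axial_force" = true
  · have hB : List.foldl (pickBest c) none mpcoItems = some ("axial_force", "section.force") := by
      rw [show mpcoItems = [("stress", "stresses"), ("strain", "strains"), ("von_mises_stress", "stresses"), ("principal_stress", "stresses"), ("pressure_hydrostatic", "stresses"), ("equivalent_plastic_strain", "strains")] ++ ("axial_force", "section.force") :: [("shear", "section.force"), ("torsion", "section.force"), ("bending_moment", "section.force"), ("fiber_stress", "section.fiber.stress"), ("fiber_strain", "section.fiber.strain"), ("nodal_resisting_force", "globalForce"), ("nodal_resisting_force_local", "localForce"), ("nodal_resisting_moment", "globalForce"), ("nodal_resisting_moment_local", "localForce")] from rfl]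
      refine main_case c _ _ _ _ h12 ?_ ?_
      · intro q u hq hm; fin_cases hq <;> first | decide | simp_all
      · intro q u hq hm; fin_cases hq <;> first | decide | simp_all
    rw [hB]
    simp [matchTokA?, mpcoSorted, h1, h2, h3, h4, h5, h6, h7, h8, h9, h10, h11, h12]
  by_cases h13 : mB c "torsion" = true
  · have hB : List.foldl (pickBest c) none mpcoItems = some ("torsion", "section.force") := by
      rw [show mpcoItems = [("stress", "stresses"), ("strain", "strains"), ("von_mises_stress", "stresses"), ("principal_stress", "stresses"), ("pressure_hydrostatic", "stresses"), ("equivalent_plastic_strain", "strains"), ("axial_force", "section.force"), ("shear", "section.force")] ++ ("torsion", "section.force") :: [("bending_moment", "section.force"), ("fiber_stress", "section.fiber.stress"), ("fiber_strain", "section.fiber.strain"), ("nodal_resisting_force", "globalForce"), ("nodal_resisting_force_local", "localForce"), ("nodal_resisting_moment", "globalForce"), ("nodal_resisting_moment_local", "localForce")] from rfl]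
      refine main_case c _ _ _ _ h13 ?_ ?_
      · intro q u hq hm; fin_cases hq <;> first | decide | simp_all
      · intro q u hq hm; fin_cases hq <;> first | decide | simp_all
    rw [hB]
    simp [matchTokA?, mpcoSorted, h1, h2, h3, h4, h5, h6, h7, h8, h9, h10, h11, h12, h13]
  by_cases h14 : mB c "stress" = true
  · have hB : List.foldl (pickBest c) none mpcoItems = some ("stress", "stresses") := by
      rw [show mpcoItems = [] ++ ("stress", "stresses") :: [("strain", "strains"), ("von_mises_stress", "stresses"), ("principal_stress", "stresses"), ("pressure_hydrostatic", "stresses"), ("equivalent_plastic_strain", "strains"), ("axial_force", "section.force"), ("shear", "section.force"), ("torsion", "section.force"), ("bending_moment", "section.force"), ("fiber_stress", "section.fiber.stress"), ("fiber_strain", "section.fiber.strain"), ("nodal_resisting_force", "globalForce"), ("nodal_resisting_force_local", "localForce"), ("nodal_resisting_moment", "globalForce"), ("nodal_resisting_moment_local", "localForce")] from rfl]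
      refine main_case c _ _ _ _ h14 ?_ ?_
      · intro q u hq hm; fin_cases hq <;> first | decide | simp_all
      · intro q u hq hm; fin_cases hq <;> first | decide | simp_all
    rw [hB]
    simp [matchTokA?, mpcoSorted, h1, h2, h3, h4, h5, h6, h7, h8, h9, h10, h11, h12, h13, h14]
  by_cases h15 : mB c "strain" = true
  · have hB : List.foldl (pickBest c) none mpcoItems = some ("strain", "strains") := by
      rw [show mpcoItems = [("stress", "stresses")] ++ ("strain", "strains") :: [("von_mises_stress", "stresses"), ("principal_stress", "stresses"), ("pressure_hydrostatic", "stresses"), ("equivalent_plastic_strain", "strains"), ("axial_force", "section.force"), ("shear", "section.force"), ("torsion", "section.force"), ("bending_moment", "section.force"), ("fiber_stress", "section.fiber.stress"), ("fiber_strain", "section.fiber.strain"), ("nodal_resisting_force", "globalForce"), ("nodal_resisting_force_local", "localForce"), ("nodal_resisting_moment", "globalForce"), ("nodal_resisting_moment_local", "localForce")] from rfl]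
      refine main_case c _ _ _ _ h15 ?_ ?_
      · intro q u hq hm; fin_cases hq <;> first | decide | simp_all
      · intro q u hq hm; fin_cases hq <;> first | decide | simp_all
    rw [hB]
    simp [matchTokA?, mpcoSorted, h1, h2, h3, h4, h5, h6, h7, h8, h9, h10, h11, h12, h13, h14, h15]
  by_cases h16 : mB c "shear" = true
  · have hB : List.foldl (pickBest c) none mpcoItems = some ("shear", "section.force") := by
      rw [show mpcoItems = [("stress", "stresses"), ("strain", "strains"), ("von_mises_stress", "stresses"), ("principal_stress", "stresses"), ("pressure_hydrostatic", "stresses"), ("equivalent_plastic_strain", "strains"), ("axial_force", "section.force")] ++ ("shear", "section.force") :: [("torsion", "section.force"), ("bending_moment", "section.force"), ("fiber_stress", "section.fiber.stress"), ("fiber_strain", "section.fiber.strain"), ("nodal_resisting_force", "globalForce"), ("nodal_resisting_force_local", "localForce"), ("nodal_resisting_moment", "globalForce"), ("nodal_resisting_moment_local", "localForce")] from rfl]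
      refine main_case c _ _ _ _ h16 ?_ ?_
      · intro q u hq hm; fin_cases hq <;> first | decide | simp_all
      · intro q u hq hm; fin_cases hq <;> first | decide | simp_all
    rw [hB]
    simp [matchTokA?, mpcoSorted, h1, h2, h3, h4, h5, h6, h7, h8, h9, h10, h11, h12, h13, h14, h15, h16]
  have hB : List.foldl (pickBest c) none mpcoItems = none := by
    apply fold_nomatch
    intro q u hq; fin_cases hq <;> simp_all
  rw [hB]
  simp [matchTokA?, mpcoSorted, h1, h2, h3, h4, h5, h6, h7, h8, h9, h10, h11, h12, h13, h14, h15, h16]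

-- ===== VERDICT (by name: the statement is the Claim_ definition above) =====
theorem canonical_to_mpco_element_token_py_spec : Claim_equal_canonical_to_mpco_element_token_py := by
  intro canonical _
  unfold Spec_canonical_to_mpco_element_token_py
  exact ab_eq canonical
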